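-- pv_equiv track=rewrite | github.com/bbrsik/messenger | message/api_views.py | replace_symbols
-- ===== SOURCE A (Python) =====
-- def replace_symbols(source, target, replacer):
--     result = ""
--     previous_index = 0
--     source_lower = source.lower()
--     target_lower = target.lower()
--
--     index = source_lower.find(target_lower)
--
--     while index != -1:
--         result += source[previous_index:index]
--         result += replacer * len(target)
--
--         previous_index = index + len(target)
--         index = source_lower.find(target_lower, previous_index)
--
--     result += source[previous_index:len(source)]
--     return result
-- ===== SOURCE B (Python) =====
-- def replace_symbols(source, target, replacer):
--     source_lower = source.lower()
--     target_lower = target.lower()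
--     n, m = len(source), len(target)
--     out = []
--     i = 0
--     while i < n:
--         if source_lower[i:i+m] == target_lower:
--             out.append(replacer * m)
--             i += m
--         else:
--             out.append(source[i])
--             i += 1
--     return "".join(out)
-- ===== Notes on version B (the rewrite author's own statement) =====
-- stated objective: alternative
-- what changed: B drops A's repeated .find() jumps entirely and instead walks the source one position at a time, comparing the m-character lowercased window at each index and emitting either the replacement block or the single source character (a naive window matcher instead of library substring search).
import Mathlib
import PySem

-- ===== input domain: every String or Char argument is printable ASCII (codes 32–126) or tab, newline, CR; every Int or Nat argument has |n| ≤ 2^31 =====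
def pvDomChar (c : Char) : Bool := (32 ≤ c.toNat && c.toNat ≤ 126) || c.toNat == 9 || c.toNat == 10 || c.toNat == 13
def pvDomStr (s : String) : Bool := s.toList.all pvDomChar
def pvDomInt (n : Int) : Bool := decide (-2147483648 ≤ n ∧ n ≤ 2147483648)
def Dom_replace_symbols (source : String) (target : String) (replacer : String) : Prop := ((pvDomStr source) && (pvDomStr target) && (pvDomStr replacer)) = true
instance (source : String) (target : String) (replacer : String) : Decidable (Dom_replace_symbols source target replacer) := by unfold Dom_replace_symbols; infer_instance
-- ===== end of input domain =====

-- B replaces A's repeated .find() jumps by a single left-to-right position scan that compares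
-- the m-character window at each index and emits one piece per step; objective: alternative
-- algorithm (naive window matcher instead of library substring search), same cost class.

-- ===== PORT A =====
-- A's while loop as fuel recursion; fuel = len(source)+1 is exhausted only when the loop would
-- not terminate (empty target, excluded by Pre_): non-overlapping matches advance prev by
-- len(target) ≥ 1 each step, so at most len(source)+1 iterations happen.
-- 'replacer * len(target)' (Python str*int) is ported by hand as (List.replicate n cs).flatten — exact for n ≥ 0.
def replaceSymbolsGoA (src srcL tgtL rep : List Char) (tlen : Nat) :
    Nat → Int → Int → List Char → List Char
  | 0, prev, _, acc => acc ++ PySem.List.slice src (some prev) (some (src.length : Int))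
  | fuel + 1, prev, idx, acc =>
    if idx = -1 then
      -- result += source[previous_index:len(source)]
      acc ++ PySem.List.slice src (some prev) (some (src.length : Int))
    else
      replaceSymbolsGoA src srcL tgtL rep tlen fuel
        (idx + tlen)
        (PySem.Chars.findFrom srcL tgtL (idx + tlen) none)
        (acc ++ PySem.List.slice src (some prev) (some idx) ++ (List.replicate tlen rep).flatten)

def replace_symbols (source : String) (target : String) (replacer : String) : String :=
  -- source_lower / target_lower are PySem.Chars.lower source.toList / target.toList
  String.ofList (replaceSymbolsGoA source.toList (PySem.Chars.lower source.toList)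
    (PySem.Chars.lower target.toList) replacer.toList target.toList.length
    (source.toList.length + 1) 0
    (PySem.Chars.find (PySem.Chars.lower source.toList) (PySem.Chars.lower target.toList)) [])

-- ===== PORT B =====
-- Source B's 'while i < n' scan: out is the Python list of strings (List (List Char)), one entry
-- appended per iteration; fuel = len(source)+1 is exhausted only when the loop would not
-- terminate (empty target, excluded by Pre_): i grows by ≥ 1 per iteration when len(target) ≥ 1.
-- 'replacer * m' is again ported as (List.replicate m _).flatten; 'source[i]' is src[i] under the
-- loop guard i < len(source), which is Python-exact there.
def replaceSymbolsGoB (src srcL tgtL pad : List Char) (m : Nat) :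
    Nat → Nat → List (List Char) → List (List Char)
  | 0, _, out => out
  | fuel + 1, i, out =>
    if h : i < src.length then
      if PySem.List.slice srcL (some (i : Int)) (some ((i + m : Nat) : Int)) = tgtL then
        replaceSymbolsGoB src srcL tgtL pad m fuel (i + m) (out ++ [pad])
      else
        replaceSymbolsGoB src srcL tgtL pad m fuel (i + 1) (out ++ [[src[i]]])
    else out

def replace_symbols_alt (source : String) (target : String) (replacer : String) : String :=
  -- "".join(out) is the flatten of the accumulated list of strings
  String.ofList ((replaceSymbolsGoB source.toList (PySem.Chars.lower source.toList)
    (PySem.Chars.lower target.toList)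
    ((List.replicate target.toList.length replacer.toList).flatten)
    target.toList.length
    (source.toList.length + 1) 0 []).flatten)

-- ===== PRECONDITION & SPEC =====
-- Pre_ excludes only target = "": there Python A (and Python B) loops forever — find('',''…)
-- returns the same index each time — so A returns on no input outside Pre_.
def Pre_replace_symbols (source : String) (target : String) (replacer : String) : Prop :=
  target.toList ≠ []
instance (source : String) (target : String) (replacer : String) : Decidable (Pre_replace_symbols source target replacer) := by unfold Pre_replace_symbols; infer_instance

def pvWitness_replace_symbols : String × String × String := ("Hello World", "o", "*")

def Spec_replace_symbols (source : String) (target : String) (replacer : String) (out : String) : Prop := out = replace_symbols_alt source target replacer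
instance (source : String) (target : String) (replacer : String) (out : String) : Decidable (Spec_replace_symbols source target replacer out) := by unfold Spec_replace_symbols; infer_instance

-- ===== CLAIM (what is proved, stated in full; the proofs are below) =====
def Claim_equal_replace_symbols : Prop := ∀ (source : String) (target : String) (replacer : String), Dom_replace_symbols source target replacer → Pre_replace_symbols source target replacer → Spec_replace_symbols source target replacer (replace_symbols source target replacer)

-- ===== LEMMAS AND PROOFS =====

-- B's loop is the identity once i ≥ n
lemma goB_of_le (src srcL tgtL pad : List Char) (m f i : Nat) (out : List (List Char))
    (h : src.length ≤ i) : replaceSymbolsGoB src srcL tgtL pad m f i out = out := by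
  cases f with
  | zero => rfl
  | succ f => rw [replaceSymbolsGoB, dif_neg (by omega)]


-- one loop iteration of B, unmatched / matched window
lemma goB_step_nomatch (src srcL tgtL pad : List Char) (m f i : Nat) (out : List (List Char))
    (hi : i < src.length)
    (hnm : PySem.List.slice srcL (some (i : Int)) (some ((i + m : Nat) : Int)) ≠ tgtL) :
    replaceSymbolsGoB src srcL tgtL pad m (f + 1) i out
      = replaceSymbolsGoB src srcL tgtL pad m f (i + 1) (out ++ [[src[i]]]) := by
  rw [replaceSymbolsGoB, dif_pos hi, if_neg hnm]

lemma goB_step_match (src srcL tgtL pad : List Char) (m f i : Nat) (out : List (List Char))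
    (hi : i < src.length)
    (hmt : PySem.List.slice srcL (some (i : Int)) (some ((i + m : Nat) : Int)) = tgtL) :
    replaceSymbolsGoB src srcL tgtL pad m (f + 1) i out
      = replaceSymbolsGoB src srcL tgtL pad m f (i + m) (out ++ [pad]) := by
  rw [replaceSymbolsGoB, dif_pos hi, if_pos hmt]

-- the accumulator only collects appends
lemma goB_append (src srcL tgtL pad : List Char) (m : Nat) :
    ∀ (f i : Nat) (out : List (List Char)),
      replaceSymbolsGoB src srcL tgtL pad m f i out
        = out ++ replaceSymbolsGoB src srcL tgtL pad m f i [] := by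
  intro f
  induction f with
  | zero => intro i out; simp [replaceSymbolsGoB]
  | succ f ih =>
    intro i out
    by_cases h : i < src.length
    · rw [replaceSymbolsGoB, dif_pos h, replaceSymbolsGoB, dif_pos h]
      split_ifs
      · rw [ih _ (out ++ [pad]), ih _ ([] ++ [pad])]; simp
      · rw [ih _ (out ++ [[src[i]]]), ih _ ([] ++ [[src[i]]])]; simp
    · rw [goB_of_le _ _ _ _ _ _ _ _ (by omega), goB_of_le _ _ _ _ _ _ _ _ (by omega)]
      simp

-- with a nonempty target any fuel ≥ n - i computes the same value
lemma goB_fuel (src srcL tgtL pad : List Char) (m : Nat) (hm : 0 < m) :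
    ∀ (f f' i : Nat) (out : List (List Char)),
      src.length ≤ i + f → src.length ≤ i + f' →
      replaceSymbolsGoB src srcL tgtL pad m f i out
        = replaceSymbolsGoB src srcL tgtL pad m f' i out := by
  intro f
  induction f with
  | zero =>
    intro f' i out hf hf'
    rw [goB_of_le _ _ _ _ _ _ _ _ (by omega), goB_of_le _ _ _ _ _ _ _ _ (by omega)]
  | succ f ih =>
    intro f' i out hf hf'
    by_cases h : i < src.length
    · cases f' with
      | zero => omega
      | succ f' =>
        rw [replaceSymbolsGoB, dif_pos h, replaceSymbolsGoB, dif_pos h]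
        split_ifs
        · exact ih f' (i + m) _ (by omega) (by omega)
        · exact ih f' (i + 1) _ (by omega) (by omega)
    · rw [goB_of_le _ _ _ _ _ _ _ _ (by omega), goB_of_le _ _ _ _ _ _ _ _ (by omega)]

-- the window test of B is exactly "tgtL is a prefix of srcL.drop p" (tgtL has length m)
lemma window_iff (srcL tgtL : List Char) (m p : Nat) (hT : tgtL.length = m) :
    PySem.List.slice srcL (some (p : Int)) (some ((p + m : Nat) : Int)) = tgtL
      ↔ tgtL <+: srcL.drop p := by
  have hpm : p + m - p = m := by omega
  rw [PySem.List.slice_natCast, hpm, List.prefix_iff_eq_take, hT]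
  exact ⟨fun h => h.symm, fun h => h.symm⟩

-- unrolling B over a match-free stretch [i, i+d) emits exactly those source characters
lemma goB_skip (src srcL tgtL pad : List Char) (m : Nat) (hm : 0 < m) :
    ∀ (d i : Nat), i + d ≤ src.length →
      (∀ p, i ≤ p → p < i + d →
        PySem.List.slice srcL (some (p : Int)) (some ((p + m : Nat) : Int)) ≠ tgtL) →
      (replaceSymbolsGoB src srcL tgtL pad m (src.length + 1) i []).flatten
        = (src.drop i).take d
          ++ (replaceSymbolsGoB src srcL tgtL pad m (src.length + 1) (i + d) []).flatten := by
  intro d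
  induction d with
  | zero => intro i _ _; simp
  | succ d ih =>
    intro i hd hnm
    have hi : i < src.length := by omega
    have hadd : i + (d + 1) = i + 1 + d := by omega
    rw [goB_step_nomatch src srcL tgtL pad m src.length i [] hi (hnm i le_rfl (by omega)),
      goB_append,
      goB_fuel src srcL tgtL pad m hm src.length (src.length + 1) (i + 1) [] (by omega) (by omega),
      List.flatten_append,
      ih (i + 1) (by omega) (fun p h1 h2 => hnm p (by omega) (by omega)),
      hadd, List.drop_eq_getElem_cons hi, List.take_succ_cons]
    simp

-- a prefix of a later drop is an infix of an earlier drop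
lemma prefix_drop_infix (L T : List Char) (i p : Nat) (hip : i ≤ p)
    (h : T <+: L.drop p) : T <:+: L.drop i := by
  have : L.drop p = (L.drop i).drop (p - i) := by rw [List.drop_drop]; congr 1; omega
  rw [this] at h
  exact h.isInfix.trans (List.drop_suffix _ _).isInfix

-- main invariant: from any position i, A's find-and-jump loop (seeded with find(..., i))
-- produces what remains of B's position scan from i
lemma goA_eq_goB (src srcL tgtL rep : List Char) (m : Nat) (hm : 0 < m)
    (hL : srcL.length = src.length) (hT : tgtL.length = m) :
    ∀ (fa i : Nat) (acc : List Char), i ≤ src.length → src.length - i < fa →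
      replaceSymbolsGoA src srcL tgtL rep m fa (i : Int)
          (PySem.Chars.findFrom srcL tgtL (i : Int) none) acc
        = acc ++ (replaceSymbolsGoB src srcL tgtL
            ((List.replicate m rep).flatten) m (src.length + 1) i []).flatten := by
  intro fa
  induction fa with
  | zero => intro i acc h1 h2; omega
  | succ fa ih =>
    intro i acc hi hfa
    have hiL : i ≤ srcL.length := by omega
    by_cases hj : PySem.Chars.findFrom srcL tgtL (i : Int) none = -1
    · -- no further match: A appends the tail slice, B walks the tail character by character
      rw [replaceSymbolsGoA, if_pos hj]
      have hnm : ∀ p, i ≤ p → p < i + (src.length - i) →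
          PySem.List.slice srcL (some (p : Int)) (some ((p + m : Nat) : Int)) ≠ tgtL := by
        intro p h1 _ hc
        have hpre : tgtL <+: srcL.drop p := (window_iff srcL tgtL m p hT).mp hc
        exact ((PySem.Chars.findFrom_natCast_eq_neg_one_iff srcL tgtL i hiL).mp hj)
          (prefix_drop_infix srcL tgtL i p h1 hpre)
      rw [goB_skip src srcL tgtL _ m hm (src.length - i) i (by omega) hnm,
        goB_of_le _ _ _ _ _ _ _ _ (by omega)]
      have : PySem.List.slice src (some (i : Int)) (some (src.length : Int)) = src.drop i := by
        have : ((src.length : Nat) : Int) = (src.length : Int) := rfl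
        rw [← this, PySem.List.slice_natCast]
        exact List.take_of_length_le (by simp)
      rw [this]
      simp [List.take_of_length_le]
    · -- a match at j = findFrom …: B walks [i, j) unmatched, matches at j, both jump to j + m
      obtain ⟨hk, hpre, hmin⟩ := PySem.Chars.findFrom_natCast_spec srcL tgtL i hiL hj
      set j : Int := PySem.Chars.findFrom srcL tgtL (i : Int) none with hjdef
      have hj0 : 0 ≤ j := le_trans (by exact_mod_cast Int.natCast_nonneg i) hk
      set jN : Nat := j.toNat with hjN
      have hjcast : j = (jN : Int) := (Int.toNat_of_nonneg hj0).symm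
      have hijN : i ≤ jN := by omega
      have hjm : jN + m ≤ src.length := by
        have := hpre.length_le
        simp [hT] at this
        omega
      rw [replaceSymbolsGoA, if_neg hj]
      have hcast : j + (m : Int) = ((jN + m : Nat) : Int) := by rw [hjcast]; push_cast; ring
      rw [hcast, ih (jN + m) _ (by omega) (by omega)]
      -- B side: skip [i, jN), then the match step at jN
      have hnm : ∀ p, i ≤ p → p < i + (jN - i) →
          PySem.List.slice srcL (some (p : Int)) (some ((p + m : Nat) : Int)) ≠ tgtL := by
        intro p h1 h2 hc
        exact hmin p h1 (by omega) ((window_iff srcL tgtL m p hT).mp hc)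
      rw [goB_skip src srcL tgtL _ m hm (jN - i) i (by omega) hnm]
      have hieq : i + (jN - i) = jN := by omega
      rw [hieq]
      have hjn : jN < src.length := by omega
      rw [goB_step_match src srcL tgtL ((List.replicate m rep).flatten) m src.length jN [] hjn
          ((window_iff srcL tgtL m jN hT).mpr hpre),
        goB_append src srcL tgtL _ m src.length (jN + m) ([] ++ [(List.replicate m rep).flatten]),
        goB_fuel src srcL tgtL _ m hm src.length (src.length + 1) (jN + m) [] (by omega) (by omega)]
      have hsl : PySem.List.slice src (some (i : Int)) (some j) = (src.drop i).take (jN - i) := by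
        rw [hjcast, PySem.List.slice_natCast]
      rw [hsl]
      simp

-- ===== VERDICT (by name: the statement is the Claim_ definition above) =====
theorem replace_symbols_spec : Claim_equal_replace_symbols := by
  intro source target replacer _ hpre
  unfold Spec_replace_symbols replace_symbols replace_symbols_alt
  have hm : 0 < target.toList.length := List.length_pos_iff.mpr hpre
  have hL : (PySem.Chars.lower source.toList).length = source.toList.length := by
    simp [PySem.Chars.lower]
  have hT : (PySem.Chars.lower target.toList).length = target.toList.length := by
    simp [PySem.Chars.lower]
  have h0 : ((0 : Nat) : Int) = (0 : Int) := rfl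
  rw [← PySem.Chars.findFrom_zero, ← h0,
    goA_eq_goB source.toList (PySem.Chars.lower source.toList) (PySem.Chars.lower target.toList)
      replacer.toList target.toList.length hm hL hT (source.toList.length + 1) 0 [] (by omega)
      (by omega)]
  simp
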